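-- pv_equiv track=rewrite | github.com/gabeorlanski/bimodal-code-generation | src/data/langauge_modeling.py | raw_group_texts
-- ===== SOURCE A (Python) =====
-- from typing import Dict, List
--
-- def raw_group_texts(texts: List, concat_token, seq_length, padding=False):
--     buffer = []
--     for text in texts:
--         buffer.append(text)
--     all_token_ids = []
--
--     for tokenized_input in buffer:
--         all_token_ids.extend(tokenized_input + [concat_token])
--
--     all_input_ids = []
--     all_attention_mask = []
--     for i in range(0, len(all_token_ids), seq_length):
--         input_ids = all_token_ids[i: i + seq_length]
--         input_len = len(input_ids)
--         attention_mask = [1] * input_len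
--
--         # We do not want to skip any examples, so we must pad some of
--         # them with the concat id. But, we also want those to be ignored
--         # so we need to create the attention mask.
--         if not padding and len(input_ids) != seq_length:
--             continue
--         elif padding:
--             pad_amount = seq_length - input_len
--             input_ids.extend([concat_token] * pad_amount)
--             attention_mask.extend([0] * pad_amount)
--
--         all_input_ids.append(input_ids)
--         all_attention_mask.append(attention_mask)
--
--     out = {
--         "input_ids"     : all_input_ids,
--         "attention_mask": all_attention_mask,
--         "labels"        : all_input_ids.copy()
--     }
--
--     return out
-- ===== SOURCE B (Python) =====
-- def raw_group_texts(texts, concat_token, seq_length, padding=False):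
--     tokens = [tok for text in texts for tok in text + [concat_token]]
--     n = len(tokens)
--     if padding:
--         pad = (-n) % seq_length
--         tokens = tokens + [concat_token] * pad
--         mask = [1] * n + [0] * pad
--     else:
--         keep = (n // seq_length) * seq_length
--         tokens = tokens[:keep]
--         mask = [1] * len(tokens)
--     all_input_ids = [tokens[i:i + seq_length] for i in range(0, len(tokens), seq_length)]
--     all_attention_mask = [mask[i:i + seq_length] for i in range(0, len(mask), seq_length)]
--     return {"input_ids": all_input_ids,
--             "attention_mask": all_attention_mask,
--             "labels": all_input_ids.copy()}
-- ===== Notes on version B (the rewrite author's own statement) =====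
-- stated objective: simpler
-- what changed: B replaces A's per-chunk branch (skip-or-pad inside the chunk loop) by a single up-front decision: it truncates the flat token list to a multiple of seq_length (no padding) or pads it once and builds one global attention mask (padding), then slices tokens and mask into chunks in lockstep with no conditional.
import Mathlib
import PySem

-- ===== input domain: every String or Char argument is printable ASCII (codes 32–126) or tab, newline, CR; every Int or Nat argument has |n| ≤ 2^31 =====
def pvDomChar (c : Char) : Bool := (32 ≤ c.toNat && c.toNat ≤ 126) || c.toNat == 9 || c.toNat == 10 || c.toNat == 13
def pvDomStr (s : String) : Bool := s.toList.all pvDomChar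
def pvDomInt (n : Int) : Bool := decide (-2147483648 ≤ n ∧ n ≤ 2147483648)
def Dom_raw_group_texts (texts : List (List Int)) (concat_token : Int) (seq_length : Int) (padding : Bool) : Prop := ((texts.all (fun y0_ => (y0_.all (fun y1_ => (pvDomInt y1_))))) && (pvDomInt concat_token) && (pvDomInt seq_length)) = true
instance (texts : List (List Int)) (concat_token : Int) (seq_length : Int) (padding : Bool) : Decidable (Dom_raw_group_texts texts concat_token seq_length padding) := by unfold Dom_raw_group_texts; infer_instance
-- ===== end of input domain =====

-- B pads/truncates the flat token list once and slices tokens and one global mask in lockstep, instead of A's per-chunk skip-or-pad branch; objective: simpler. Return-value equivalence only (A mutates no argument).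

-- ===== PORT A =====
-- Python list multiplication '[x] * k' is ported as List.replicate k.toNat (exact: Python yields [] for negative k).
def raw_group_texts (texts : List (List Int)) (concat_token : Int) (seq_length : Int) (padding : Bool) : List (String × List (List Int)) :=
  let buffer := texts.foldl (fun b t => b ++ [t]) []
  let all_token_ids := buffer.foldl (fun acc t => acc ++ (t ++ [concat_token])) ([] : List Int)
  let p := (PySem.List.pyRange 0 (all_token_ids.length : Int) seq_length).foldl
    (fun (acc : List (List Int) × List (List Int)) i =>
      let input_ids := PySem.List.slice all_token_ids (some i) (some (i + seq_length))
      let input_len : Int := input_ids.length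
      let attention_mask : List Int := List.replicate input_ids.length 1
      if padding = false ∧ input_len ≠ seq_length then acc
      else if padding = true then
        (acc.1 ++ [input_ids ++ List.replicate (seq_length - input_len).toNat concat_token],
         acc.2 ++ [attention_mask ++ List.replicate (seq_length - input_len).toNat 0])
      else (acc.1 ++ [input_ids], acc.2 ++ [attention_mask]))
    ([], [])
  [("input_ids", p.1), ("attention_mask", p.2), ("labels", p.1)]

-- ===== PORT B =====
def raw_group_texts_alt (texts : List (List Int)) (concat_token : Int) (seq_length : Int) (padding : Bool) : List (String × List (List Int)) :=
  let tokens := texts.flatMap (fun t => t ++ [concat_token])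
  let n : Int := tokens.length
  let tm : List Int × List Int :=
    if padding then
      let pad := PySem.Int.mod (-n) seq_length
      (tokens ++ List.replicate pad.toNat concat_token,
       List.replicate n.toNat 1 ++ List.replicate pad.toNat 0)
    else
      let keep := PySem.Int.floordiv n seq_length * seq_length
      let kept := PySem.List.slice tokens none (some keep)
      (kept, List.replicate kept.length 1)
  let ids := (PySem.List.pyRange 0 (tm.1.length : Int) seq_length).map
      (fun i => PySem.List.slice tm.1 (some i) (some (i + seq_length)))
  let am := (PySem.List.pyRange 0 (tm.2.length : Int) seq_length).map
      (fun i => PySem.List.slice tm.2 (some i) (some (i + seq_length)))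
  [("input_ids", ids), ("attention_mask", am), ("labels", ids)]

-- ===== PRECONDITION & SPEC =====
-- Pre_ excludes exactly seq_length = 0, where Python A raises ValueError (range() step 0); B raises there too.
def Pre_raw_group_texts (texts : List (List Int)) (concat_token : Int) (seq_length : Int) (padding : Bool) : Prop := seq_length ≠ 0
instance (texts : List (List Int)) (concat_token : Int) (seq_length : Int) (padding : Bool) : Decidable (Pre_raw_group_texts texts concat_token seq_length padding) := by unfold Pre_raw_group_texts; infer_instance
def pvWitness_raw_group_texts : List (List Int) × Int × Int × Bool := ([[1, 2], [3]], 0, 2, false)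

def Spec_raw_group_texts (texts : List (List Int)) (concat_token : Int) (seq_length : Int) (padding : Bool) (out : List (String × List (List Int))) : Prop := out = raw_group_texts_alt texts concat_token seq_length padding
instance (texts : List (List Int)) (concat_token : Int) (seq_length : Int) (padding : Bool) (out : List (String × List (List Int))) : Decidable (Spec_raw_group_texts texts concat_token seq_length padding out) := by unfold Spec_raw_group_texts; infer_instance

-- ===== CLAIM (what is proved, stated in full; the proofs are below) =====
def Claim_equal_raw_group_texts : Prop := ∀ (texts : List (List Int)) (concat_token : Int) (seq_length : Int) (padding : Bool), Dom_raw_group_texts texts concat_token seq_length padding → Pre_raw_group_texts texts concat_token seq_length padding → Spec_raw_group_texts texts concat_token seq_length padding (raw_group_texts texts concat_token seq_length padding)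

-- ===== LEMMAS AND PROOFS =====

-- Chunking a list into blocks of L.
def pvChunks {α : Type} (L : Nat) (xs : List α) : List (List α) :=
  if h : xs = [] ∨ L = 0 then [] else xs.take L :: pvChunks L (xs.drop L)
termination_by xs.length
decreasing_by
  push_neg at h
  have : 0 < xs.length := List.length_pos_iff.mpr h.1
  simp only [List.length_drop]
  omega

theorem pvChunks_nil {α : Type} (L : Nat) : pvChunks L ([] : List α) = [] := by
  rw [pvChunks]; simp

theorem pvChunks_cons {α : Type} (L : Nat) (xs : List α) (hL : L ≠ 0) (hxs : xs ≠ []) :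
    pvChunks L xs = xs.take L :: pvChunks L (xs.drop L) := by
  rw [pvChunks]; simp [hL, hxs]

theorem pr_pos_nil (a b s : Int) (hs : 0 < s) (h : b ≤ a) : PySem.List.pyRange a b s = [] := by
  rw [PySem.List.pyRange_of_pos a b hs]
  simp [show ¬ a < b by omega]

theorem pr_neg_nil (b s : Int) (hs : s < 0) (hb : 0 ≤ b) : PySem.List.pyRange 0 b s = [] := by
  simp only [PySem.List.pyRange]
  rw [if_neg (by omega)]
  simp [show ¬ 0 < s by omega, show ¬ b < 0 by omega]

theorem pr_pos_cons (a b s : Int) (hs : 0 < s) (h : a < b) :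
    PySem.List.pyRange a b s = a :: PySem.List.pyRange (a + s) b s := by
  rw [PySem.List.pyRange_of_pos a b hs, PySem.List.pyRange_of_pos (a + s) b hs, if_pos h]
  by_cases h2 : a + s < b
  · rw [if_pos h2]
    have hc : (b - a + s - 1) / s = (b - (a + s) + s - 1) / s + 1 := by
      have e : b - a + s - 1 = (b - (a + s) + s - 1) + 1 * s := by ring
      rw [e, Int.add_mul_ediv_right _ _ (by omega)]
    have hx : 0 ≤ (b - (a + s) + s - 1) / s := Int.ediv_nonneg (by omega) (by omega)
    have hn : ((b - a + s - 1) / s).toNat = ((b - (a + s) + s - 1) / s).toNat + 1 := by omega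
    rw [hn, List.range_succ_eq_map, List.map_cons, List.map_map]
    congr 1
    · simp
    · apply List.map_congr_left
      intro k _
      simp only [Function.comp_apply, Nat.succ_eq_add_one]
      push_cast
      ring
  · rw [if_neg h2]
    have h1 : 1 ≤ (b - a + s - 1) / s := by
      rw [Int.le_ediv_iff_mul_le hs]; omega
    have h2' : (b - a + s - 1) / s < 2 := by
      rw [Int.ediv_lt_iff_lt_mul hs]; omega
    have he : ((b - a + s - 1) / s).toNat = 1 := by omega
    rw [he]
    simp

theorem pr_shift (a b s : Int) (hs : 0 < s) :
    PySem.List.pyRange (a + s) b s = (PySem.List.pyRange a (b - s) s).map (· + s) := by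
  rw [PySem.List.pyRange_of_pos (a + s) b hs, PySem.List.pyRange_of_pos a (b - s) hs, List.map_map]
  have e2 : b - (a + s) + s - 1 = b - s - a + s - 1 := by ring
  rw [e2]
  have e3 : (if a + s < b then ((b - s - a + s - 1) / s).toNat else 0)
      = (if a < b - s then ((b - s - a + s - 1) / s).toNat else 0) := by
    by_cases h : a + s < b
    · rw [if_pos h, if_pos (by omega)]
    · rw [if_neg h, if_neg (by omega)]
  rw [e3]
  apply List.map_congr_left
  intro k _
  simp only [Function.comp_apply]
  ring

theorem mem_pr_pos_nonneg {i b s : Int} (hs : 0 < s) (h : i ∈ PySem.List.pyRange 0 b s) : 0 ≤ i := by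
  rw [PySem.List.pyRange_of_pos 0 b hs] at h
  obtain ⟨k, _, rfl⟩ := List.mem_map.mp h
  positivity

-- The single pyRange induction: slicing at 0, L, 2L, ... is chunking.
theorem map_slice_chunks {α : Type} (L : Nat) (hL : 0 < L) (xs : List α) :
    (PySem.List.pyRange 0 (xs.length : Int) (L : Int)).map
      (fun i => PySem.List.slice xs (some i) (some (i + (L : Int)))) = pvChunks L xs := by
  induction hn : xs.length using Nat.strong_induction_on generalizing xs with
  | _ n ih =>
  subst hn
  have hLs : (0 : Int) < (L : Int) := by exact_mod_cast hL
  rcases eq_or_ne xs [] with rfl | hne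
  · simp [pvChunks_nil, pr_pos_nil 0 0 (L : Int) hLs le_rfl]
  · have hpos : 0 < xs.length := List.length_pos_iff.mpr hne
    rw [pr_pos_cons 0 (xs.length : Int) (L : Int) hLs (by exact_mod_cast hpos)]
    rw [pvChunks_cons L xs (by omega) hne]
    rw [List.map_cons, zero_add]
    congr 1
    · rw [PySem.List.slice_zero_start, PySem.List.slice_to_natCast]
    · have hsh := pr_shift 0 (xs.length : Int) (L : Int) hLs
      rw [zero_add] at hsh
      rw [hsh, List.map_map]
      by_cases hcase : L ≤ xs.length
      · have ecast : (xs.length : Int) - (L : Int) = ((xs.drop L).length : Int) := by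
          simp only [List.length_drop]; omega
        rw [ecast, ← ih (xs.drop L).length (by simp only [List.length_drop]; omega) (xs.drop L) rfl]
        apply List.map_congr_left
        intro i hi
        have hi0 : 0 ≤ i := mem_pr_pos_nonneg hLs hi
        simp only [Function.comp_apply, zero_add]
        rw [PySem.List.slice_toNat _ (by omega) (by omega),
            PySem.List.slice_toNat _ (by omega) (by omega), List.drop_drop]
        congr 1
        · omega
        · congr 1
          omega
      · have h1 : (xs.length : Int) - (L : Int) ≤ 0 := by
          have : (xs.length : Int) < (L : Int) := by exact_mod_cast Nat.lt_of_not_le hcase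
          omega
        have hdrop : xs.drop L = [] := List.drop_eq_nil_of_le (by omega)
        rw [pr_pos_nil 0 _ _ hLs h1, hdrop, pvChunks_nil]
        simp

theorem map_slice_chunks_fused {α β : Type} (L : Nat) (hL : 0 < L) (xs : List α) (h : List α → β) :
    (PySem.List.pyRange 0 (xs.length : Int) (L : Int)).map
      (fun i => h (PySem.List.slice xs (some i) (some (i + (L : Int))))) = (pvChunks L xs).map h := by
  rw [← map_slice_chunks L hL xs, List.map_map]
  rfl

theorem filtered_fused {α β : Type} (L : Nat) (hL : 0 < L) (xs : List α)
    (p : List α → Bool) (h : List α → β) :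
    ((PySem.List.pyRange 0 (xs.length : Int) (L : Int)).filter
        (fun i => p (PySem.List.slice xs (some i) (some (i + (L : Int)))))).map
      (fun i => h (PySem.List.slice xs (some i) (some (i + (L : Int)))))
      = ((pvChunks L xs).filter p).map h := by
  rw [← map_slice_chunks L hL xs, List.filter_map, List.map_map]
  rfl

theorem foldl_pair_if {α β γ : Type} (P : α → Prop) [DecidablePred P] (f : α → β) (g : α → γ)
    (l : List α) (a : List β) (b : List γ) :
    l.foldl (fun acc x => if P x then (acc.1 ++ [f x], acc.2 ++ [g x]) else acc) (a, b)
      = (a ++ (l.filter (fun x => decide (P x))).map f,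
         b ++ (l.filter (fun x => decide (P x))).map g) := by
  induction l generalizing a b with
  | nil => simp
  | cons x t ih =>
    simp only [List.foldl_cons]
    by_cases h : P x
    · rw [if_pos h]; rw [ih]; simp [h]
    · rw [if_neg h]; rw [ih]; simp [h]

theorem foldl_pair_map {α β γ : Type} (f : α → β) (g : α → γ)
    (l : List α) (a : List β) (b : List γ) :
    l.foldl (fun acc x => (acc.1 ++ [f x], acc.2 ++ [g x])) (a, b)
      = (a ++ l.map f, b ++ l.map g) := by
  induction l generalizing a b with
  | nil => simp
  | cons x t ih => simp only [List.foldl_cons]; rw [ih]; simp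

-- Non-padding: keeping only full chunks is chunking the truncated list.
theorem chunks_filter {α : Type} (L : Nat) (hL : 0 < L) (xs : List α) :
    (pvChunks L xs).filter (fun ch => decide ((ch.length : Int) = (L : Int)))
      = pvChunks L (xs.take (xs.length / L * L)) := by
  induction hn : xs.length using Nat.strong_induction_on generalizing xs with
  | _ n ih =>
  subst hn
  rcases eq_or_ne xs [] with rfl | hne
  · simp [pvChunks_nil]
  · have hpos : 0 < xs.length := List.length_pos_iff.mpr hne
    by_cases hcase : L ≤ xs.length
    · rw [pvChunks_cons L xs (by omega) hne, List.filter_cons]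
      have hlen : (xs.take L).length = L := by
        simp only [List.length_take]; omega
      rw [if_pos (by simp [hlen])]
      have hdivstep : xs.length / L = (xs.length - L) / L + 1 := Nat.div_eq_sub_div hL hcase
      have harith : xs.length / L * L = L + (xs.length - L) / L * L := by
        rw [hdivstep]; ring
      rw [harith, List.take_add]
      have htkL : xs.take L ++ (xs.drop L).take ((xs.length - L) / L * L)
          = xs.take L ++ ((xs.drop L).take ((xs.drop L).length / L * L)) := by
        congr 2
        simp only [List.length_drop]
      rw [htkL]
      have hne2 : xs.take L ++ ((xs.drop L).take ((xs.drop L).length / L * L)) ≠ [] := by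
        intro hcon
        have := congrArg List.length hcon
        simp only [List.length_append, hlen, List.length_nil] at this
        omega
      rw [pvChunks_cons L _ (by omega) hne2]
      congr 1
      · rw [List.take_append_of_le_length (by rw [hlen]), List.take_take]
        simp
      · rw [List.drop_append_of_le_length (le_of_eq hlen.symm)]
        have hdt : (xs.take L).drop L = [] := by
          apply List.drop_eq_nil_of_le
          rw [hlen]
        rw [hdt, List.nil_append]
        exact ih (xs.drop L).length (by simp only [List.length_drop]; omega) (xs.drop L) rfl
    · rw [pvChunks_cons L xs (by omega) hne, List.filter_cons]
      have hlen : (xs.take L).length = xs.length := by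
        simp only [List.length_take]; omega
      rw [if_neg (by simp only [hlen, decide_eq_true_eq]; intro hcon; exact hcase (by exact_mod_cast le_of_eq hcon.symm))]
      have hdrop : xs.drop L = [] := List.drop_eq_nil_of_le (by omega)
      rw [hdrop, pvChunks_nil, List.filter_nil]
      have hd0 : xs.length / L = 0 := Nat.div_eq_of_lt (by omega)
      simp [hd0, pvChunks_nil]

theorem chunks_map_mask {α : Type} (L : Nat) (hL : 0 < L) (k : Nat) (ys : List α) (hlen : ys.length = k * L) :
    (pvChunks L ys).map (fun ch => List.replicate ch.length (1 : Int))
      = pvChunks L (List.replicate (k * L) (1 : Int)) := by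
  induction k generalizing ys with
  | zero =>
    have : ys = [] := List.eq_nil_of_length_eq_zero (by omega)
    subst this
    simp [pvChunks_nil]
  | succ k ih =>
    have hyl : L ≤ ys.length := by
      rw [hlen]
      calc L = 1 * L := (one_mul L).symm
        _ ≤ (k + 1) * L := Nat.mul_le_mul_right L (by omega)
    have hne : ys ≠ [] := by
      intro hcon
      rw [hcon] at hyl
      simp at hyl
      omega
    rw [pvChunks_cons L ys (by omega) hne, List.map_cons]
    have hne2 : List.replicate ((k + 1) * L) (1 : Int) ≠ [] := by
      intro hcon
      have := congrArg List.length hcon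
      simp at this
      omega
    rw [pvChunks_cons L _ (by omega) hne2]
    congr 1
    · rw [List.take_replicate]
      congr 1
      · simp only [List.length_take]
        omega
    · rw [List.drop_replicate]
      have e1 : (k + 1) * L - L = k * L := by ring_nf; omega
      rw [e1]
      exact ih (ys.drop L) (by simp only [List.length_drop]; omega)

theorem pad_mod_shift (L : Nat) (hL : 0 < L) (n : Nat) (h : L ≤ n) :
    (-(n : Int)) % (L : Int) = (-((n - L : Nat) : Int)) % (L : Int) := by
  have e : ((n - L : Nat) : Int) = (n : Int) - L := by omega
  rw [e]
  have e2 : (-(n : Int)) = (-((n : Int) - L)) + (L : Int) * (-1) := by ring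
  rw [e2, Int.add_mul_emod_self_left]

theorem pad_mod_small (L : Nat) (hL : 0 < L) (n : Nat) (h2 : n ≤ L) :
    (-(n : Int)) % (L : Int) = ((L : Int) - n) % (L : Int) := by
  have e2 : (-(n : Int)) = ((L : Int) - n) + (L : Int) * (-1) := by ring
  rw [e2, Int.add_mul_emod_self_left]

-- Padding: padding each chunk is chunking the once-padded list.
theorem chunks_pad_ids (L : Nat) (hL : 0 < L) (c : Int) (xs : List Int) :
    (pvChunks L xs).map (fun ch => ch ++ List.replicate ((L : Int) - (ch.length : Int)).toNat c)
      = pvChunks L (xs ++ List.replicate ((-(xs.length : Int)) % (L : Int)).toNat c) := by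
  induction hn : xs.length using Nat.strong_induction_on generalizing xs with
  | _ n ih =>
  subst hn
  have hLs : (0 : Int) < (L : Int) := by exact_mod_cast hL
  rcases eq_or_ne xs [] with rfl | hne
  · simp [pvChunks_nil]
  · have hpos : 0 < xs.length := List.length_pos_iff.mpr hne
    by_cases hcase : L ≤ xs.length
    · have hmod : ((-(xs.length : Int)) % (L : Int)).toNat
          = ((-(((xs.drop L).length : Nat) : Int)) % (L : Int)).toNat := by
        rw [List.length_drop, ← pad_mod_shift L hL xs.length hcase]
      rw [pvChunks_cons L xs (by omega) hne, List.map_cons]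
      have hys_ne : xs ++ List.replicate ((-(xs.length : Int)) % (L : Int)).toNat c ≠ [] := by
        simp [List.append_eq_nil_iff, hne]
      rw [pvChunks_cons L _ (by omega) hys_ne]
      congr 1
      · have hlen : (xs.take L).length = L := by simp only [List.length_take]; omega
        rw [List.take_append_of_le_length (by omega : L ≤ xs.length), hlen]
        simp
      · rw [List.drop_append_of_le_length (by omega : L ≤ xs.length)]
        rw [ih (xs.drop L).length (by simp only [List.length_drop]; omega) (xs.drop L) rfl, hmod]
    · have hlt : xs.length < L := Nat.lt_of_not_le hcase
      have hdrop : xs.drop L = [] := List.drop_eq_nil_of_le (by omega)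
      rw [pvChunks_cons L xs (by omega) hne, hdrop, pvChunks_nil, List.map_cons, List.map_nil]
      have htake : xs.take L = xs := List.take_of_length_le (by omega)
      rw [htake]
      have hmod2 : ((-(xs.length : Int)) % (L : Int)).toNat = L - xs.length := by
        rw [pad_mod_small L hL xs.length (by omega),
            Int.emod_eq_of_lt (by omega) (by omega)]
        omega
      rw [hmod2]
      have htn : ((L : Int) - (xs.length : Int)).toNat = L - xs.length := by omega
      rw [htn]
      have hlen2 : (xs ++ List.replicate (L - xs.length) c).length = L := by
        simp only [List.length_append, List.length_replicate]; omega
      have hne2 : xs ++ List.replicate (L - xs.length) c ≠ [] := by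
        intro hcon
        have := congrArg List.length hcon
        rw [hlen2] at this
        simp at this
        omega
      rw [pvChunks_cons L _ (by omega) hne2,
          List.take_of_length_le (le_of_eq hlen2),
          List.drop_eq_nil_of_le (le_of_eq hlen2), pvChunks_nil]

theorem chunks_pad_mask (L : Nat) (hL : 0 < L) (xs : List Int) :
    (pvChunks L xs).map (fun ch =>
        List.replicate ch.length (1 : Int) ++ List.replicate ((L : Int) - (ch.length : Int)).toNat 0)
      = pvChunks L (List.replicate xs.length (1 : Int)
          ++ List.replicate ((-(xs.length : Int)) % (L : Int)).toNat 0) := by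
  induction hn : xs.length using Nat.strong_induction_on generalizing xs with
  | _ n ih =>
  subst hn
  have hLs : (0 : Int) < (L : Int) := by exact_mod_cast hL
  rcases eq_or_ne xs [] with rfl | hne
  · simp [pvChunks_nil]
  · have hpos : 0 < xs.length := List.length_pos_iff.mpr hne
    by_cases hcase : L ≤ xs.length
    · have hmod : ((-(xs.length : Int)) % (L : Int)).toNat
          = ((-(((xs.drop L).length : Nat) : Int)) % (L : Int)).toNat := by
        rw [List.length_drop, ← pad_mod_shift L hL xs.length hcase]
      rw [pvChunks_cons L xs (by omega) hne, List.map_cons]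
      have hmne : List.replicate xs.length (1 : Int)
          ++ List.replicate ((-(xs.length : Int)) % (L : Int)).toNat 0 ≠ [] := by
        intro hcon
        have := congrArg List.length hcon
        simp only [List.length_append, List.length_replicate, List.length_nil] at this
        omega
      rw [pvChunks_cons L _ (by omega) hmne]
      congr 1
      · have hlen : (xs.take L).length = L := by simp only [List.length_take]; omega
        rw [hlen, List.take_append_of_le_length (by simp only [List.length_replicate]; omega),
            List.take_replicate]
        have : min L xs.length = L := by omega
        rw [this]
        simp
      · rw [List.drop_append_of_le_length (by simp only [List.length_replicate]; omega),
            List.drop_replicate]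
        have hdl : xs.length - L = (xs.drop L).length := by simp only [List.length_drop]
        rw [hdl, ih (xs.drop L).length (by simp only [List.length_drop]; omega) (xs.drop L) rfl, hmod]
    · have hlt : xs.length < L := Nat.lt_of_not_le hcase
      have hdrop : xs.drop L = [] := List.drop_eq_nil_of_le (by omega)
      rw [pvChunks_cons L xs (by omega) hne, hdrop, pvChunks_nil, List.map_cons, List.map_nil]
      have htake : xs.take L = xs := List.take_of_length_le (by omega)
      rw [htake]
      have hmod2 : ((-(xs.length : Int)) % (L : Int)).toNat = L - xs.length := by
        rw [pad_mod_small L hL xs.length (by omega),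
            Int.emod_eq_of_lt (by omega) (by omega)]
        omega
      have htn : ((L : Int) - (xs.length : Int)).toNat = L - xs.length := by omega
      rw [hmod2, htn]
      have hlen2 : (List.replicate xs.length (1 : Int) ++ List.replicate (L - xs.length) (0 : Int)).length = L := by
        simp only [List.length_append, List.length_replicate]; omega
      have hne2 : List.replicate xs.length (1 : Int) ++ List.replicate (L - xs.length) (0 : Int) ≠ [] := by
        intro hcon
        have := congrArg List.length hcon
        rw [hlen2] at this
        simp at this
        omega
      rw [pvChunks_cons L _ (by omega) hne2,
          List.take_of_length_le (le_of_eq hlen2),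
          List.drop_eq_nil_of_le (le_of_eq hlen2), pvChunks_nil]

-- ===== VERDICT (by name: the statement is the Claim_ definition above) =====
theorem raw_group_texts_spec : Claim_equal_raw_group_texts := by
  intro texts c s padding _ hpre
  unfold Pre_raw_group_texts at hpre
  unfold Spec_raw_group_texts raw_group_texts raw_group_texts_alt
  simp only [PySem.List.foldl_append_singleton_eq_self, PySem.List.foldl_append_eq_flatMap,
    List.nil_append]
  generalize List.flatMap (fun t => t ++ [c]) texts = xs
  rcases lt_trichotomy s 0 with hneg | rfl | hpos
  · have hr : ∀ (m : Nat), PySem.List.pyRange 0 (m : Int) s = [] :=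
      fun m => pr_neg_nil _ _ hneg (by positivity)
    cases padding <;>
      simp only [Bool.false_eq_true, Bool.true_eq_false, false_and, if_false, if_true,
        eq_self_iff_true, ite_true, ite_false, hr, List.foldl_nil, List.map_nil]
  · exact absurd rfl hpre
  · lift s to ℕ using hpos.le with L hsL
    have hL : 0 < L := by exact_mod_cast hpos
    have hLs : (0 : Int) < (L : Int) := by exact_mod_cast hL
    cases padding
    · -- padding = false
      simp only [Bool.false_eq_true, if_false, eq_self_iff_true, true_and, ne_eq, ite_not]
      rw [foldl_pair_if
            (fun i => ((PySem.List.slice xs (some i) (some (i + (L : Int)))).length : Int) = (L : Int))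
            (fun i => PySem.List.slice xs (some i) (some (i + (L : Int))))
            (fun i => List.replicate (PySem.List.slice xs (some i) (some (i + (L : Int)))).length (1 : Int))
            _ [] []]
      simp only [List.nil_append]
      rw [filtered_fused L hL xs
            (fun ch => decide ((ch.length : Int) = (L : Int))) (fun ch => ch),
          filtered_fused L hL xs
            (fun ch => decide ((ch.length : Int) = (L : Int)))
            (fun ch => List.replicate ch.length (1 : Int))]
      simp only [List.map_id']
      rw [chunks_filter L hL xs,
          chunks_map_mask L hL (xs.length / L) (xs.take (xs.length / L * L))
            (by simp only [List.length_take]; exact Nat.min_eq_left (Nat.div_mul_le_self _ _))]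
      rw [PySem.Int.floordiv_eq_ediv_of_pos hLs]
      have hkeep : (xs.length : Int) / (L : Int) * (L : Int) = ((xs.length / L * L : Nat) : Int) := by
        rw [Nat.cast_mul, Int.natCast_div]
      rw [hkeep, PySem.List.slice_to_natCast]
      have hmin : (xs.take (xs.length / L * L)).length = xs.length / L * L := by
        simp only [List.length_take]
        exact Nat.min_eq_left (Nat.div_mul_le_self _ _)
      rw [map_slice_chunks L hL (xs.take (xs.length / L * L))]
      rw [hmin]
      rw [map_slice_chunks L hL (List.replicate (xs.length / L * L) (1 : Int))]
    · -- padding = true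
      simp only [Bool.true_eq_false, false_and, if_false, eq_self_iff_true, ite_true, if_true]
      rw [foldl_pair_map
            (fun i => PySem.List.slice xs (some i) (some (i + (L : Int)))
              ++ List.replicate ((L : Int) - ((PySem.List.slice xs (some i) (some (i + (L : Int)))).length : Int)).toNat c)
            (fun i => List.replicate (PySem.List.slice xs (some i) (some (i + (L : Int)))).length (1 : Int)
              ++ List.replicate ((L : Int) - ((PySem.List.slice xs (some i) (some (i + (L : Int)))).length : Int)).toNat (0 : Int))
            _ [] []]
      simp only [List.nil_append]
      rw [map_slice_chunks_fused L hL xs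
            (fun ch => ch ++ List.replicate ((L : Int) - (ch.length : Int)).toNat c),
          map_slice_chunks_fused L hL xs
            (fun ch => List.replicate ch.length (1 : Int)
              ++ List.replicate ((L : Int) - (ch.length : Int)).toNat (0 : Int))]
      rw [chunks_pad_ids L hL c xs, chunks_pad_mask L hL xs]
      rw [PySem.Int.mod_eq_emod_of_pos hLs]
      simp only [Int.toNat_natCast]
      rw [map_slice_chunks L hL
            (xs ++ List.replicate ((-(xs.length : Int)) % (L : Int)).toNat c),
          map_slice_chunks L hL
            (List.replicate xs.length (1 : Int)
              ++ List.replicate ((-(xs.length : Int)) % (L : Int)).toNat (0 : Int))]
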